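-- pv_equiv track=rewrite | github.com/mammaddrik/christopher | src/publickeycipher.py | stringToBlock
-- ===== SOURCE A (Python) =====
-- import string
--
-- SYMBOL = string.printable
--
-- BLOCKSIZE = 16
--
-- def stringToBlock(plaintext: str)-> list:
--     """
--     Converts a plaintext string into a list of integer blocks using a custom encoding based on `SYMBOL`.
--
--     Parameters:
--     plaintext (str): The input string to be converted into integer blocks.
--
--     Returns:
--     list: A list of integer blocks representing the encoded `plaintext`.
--
--     Examples:
--     >>> stringToBlock("hello world")
--     [311912601413, 975537]
--     """
--     output = []
--     while plaintext:
--         block_number = 0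
--         block_string = None
--         if len(plaintext) >= BLOCKSIZE:
--             block_string = plaintext[0:BLOCKSIZE]
--             plaintext = plaintext[BLOCKSIZE:]
--         else:
--             block_string = plaintext
--             plaintext = ''
--         for i in range(len(block_string)):
--             index = SYMBOL.find(block_string[i])
--             block_number += (index * (len(SYMBOL) ** i))
--         output.append(block_number)
--     return output
-- ===== SOURCE B (Python) =====
-- import string
--
-- SYMBOL = string.printable
--
-- BLOCKSIZE = 16
--
-- def _pack(s):
--     # base-len(SYMBOL) little-endian value of the whole string, divide and conquer
--     if len(s) <= 1:
--         return SYMBOL.find(s) if s else 0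
--     h = len(s) // 2
--     return _pack(s[:h]) + len(SYMBOL) ** h * _pack(s[h:])
--
-- def _split(n, k):
--     # cut n (the packed value of k blocks) into its k base-(len(SYMBOL)**BLOCKSIZE) digits
--     if k == 1:
--         return [n]
--     h = k // 2
--     hi, lo = divmod(n, (len(SYMBOL) ** BLOCKSIZE) ** h)
--     return _split(lo, h) + _split(hi, k - h)
--
-- def stringToBlock(plaintext: str) -> list:
--     if not plaintext:
--         return []
--     k = (len(plaintext) + BLOCKSIZE - 1) // BLOCKSIZE
--     return _split(_pack(plaintext), k)
-- ===== Notes on version B (the rewrite author's own statement) =====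
-- stated objective: alternative
-- what changed: Instead of A's mutating while-loop that slices off 16-char chunks and sums index*len(SYMBOL)**i per chunk, B packs the entire string into a single big base-len(SYMBOL) integer by divide-and-conquer and then recovers the blocks purely arithmetically, recursively splitting that integer with divmod by (len(SYMBOL)**16)**half -- no per-block scanning or slicing.
import Mathlib
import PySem

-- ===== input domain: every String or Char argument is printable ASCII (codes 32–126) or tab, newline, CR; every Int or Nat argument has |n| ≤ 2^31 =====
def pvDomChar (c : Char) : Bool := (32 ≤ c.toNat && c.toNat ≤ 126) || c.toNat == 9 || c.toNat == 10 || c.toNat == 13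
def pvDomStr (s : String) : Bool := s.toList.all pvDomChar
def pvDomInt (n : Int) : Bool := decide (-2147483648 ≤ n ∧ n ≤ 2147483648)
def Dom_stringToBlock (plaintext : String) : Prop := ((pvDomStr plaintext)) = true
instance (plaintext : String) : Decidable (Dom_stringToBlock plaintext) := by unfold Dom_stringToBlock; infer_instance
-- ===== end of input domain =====

-- B packs the whole string into ONE big base-100 integer by divide-and-conquer and recovers the
-- 16-char blocks arithmetically by recursive divmod splitting, replacing A's mutating
-- while/slice loop with per-chunk power sums (alternative algorithm).

-- SYMBOL = string.printable (shared module constant of both programs)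
def pySYMBOL : List Char :=
  "0123456789abcdefghijklmnopqrstuvwxyzABCDEFGHIJKLMNOPQRSTUVWXYZ!\"#$%&'()*+,-./:;<=>?@[\\]^_`{|}~ \t\n\r\x0B\x0C".toList

-- ===== PORT A =====
-- the inner 'for i in range(len(block_string))' loop of A, carrying the index i and block_number
def stringToBlock_forBlock : List Char → Nat → Int → Int
  | [], _, acc => acc
  | c :: rest, i, acc =>
      stringToBlock_forBlock rest (i + 1)
        (acc + PySem.Chars.find pySYMBOL [c] * (PySem.Chars.len pySYMBOL) ^ i)

-- the outer 'while plaintext:' loop of A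
def stringToBlock_while (cs : List Char) : List Int :=
  if _h : cs = [] then []
  else if 16 ≤ cs.length then
    stringToBlock_forBlock (PySem.List.slice cs (some 0) (some 16)) 0 0
      :: stringToBlock_while (PySem.List.slice cs (some 16) none)
  else [stringToBlock_forBlock cs 0 0]
termination_by cs.length
decreasing_by
  rw [show PySem.List.slice cs (some (16 : Int)) none = cs.drop (16 : Int).toNat from
    PySem.List.slice_from cs (by norm_num)]
  simp
  omega

def stringToBlock (plaintext : String) : List Int :=
  stringToBlock_while plaintext.toList

-- ===== PORT B =====
-- _pack(s): base-len(SYMBOL) little-endian value of the whole string, divide and conquer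
def stringToBlock_altPack (cs : List Char) : Int :=
  if h1 : cs.length ≤ 1 then
    (if cs = [] then 0 else PySem.Chars.find pySYMBOL cs)
  else
    stringToBlock_altPack (PySem.List.slice cs (some 0) (some ((cs.length / 2 : Nat) : Int))) +
      (PySem.Chars.len pySYMBOL) ^ (cs.length / 2) *
        stringToBlock_altPack (PySem.List.slice cs (some ((cs.length / 2 : Nat) : Int)) none)
termination_by cs.length
decreasing_by
  · rw [PySem.List.slice_toNat cs (by norm_num) (by positivity)]
    simp
    omega
  · rw [show PySem.List.slice cs (some ((cs.length / 2 : Nat) : Int)) none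
        = cs.drop ((cs.length / 2 : Nat) : Int).toNat from PySem.List.slice_from cs (by positivity)]
    simp
    omega

-- modulus = len(SYMBOL) ** BLOCKSIZE
def stringToBlock_altModulus : Int := (PySem.Chars.len pySYMBOL) ^ 16

-- _split(n, k): cut n (packed value of k blocks) into its k base-modulus digits;
-- divmod's divisor modulus**h is a positive constant, so divmod never raises: floordiv/mod pair.
-- (B never calls _split with k = 0; the k = 0 equation only makes the recursion total.)
def stringToBlock_altSplit : Int → Nat → List Int
  | _, 0 => []
  | n, 1 => [n]
  | n, (k + 2) =>
      stringToBlock_altSplit (PySem.Int.mod n (stringToBlock_altModulus ^ ((k + 2) / 2))) ((k + 2) / 2) ++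
        stringToBlock_altSplit (PySem.Int.floordiv n (stringToBlock_altModulus ^ ((k + 2) / 2))) (k + 2 - (k + 2) / 2)
termination_by _ k => k
decreasing_by
  · omega
  · omega

def stringToBlock_alt (plaintext : String) : List Int :=
  if plaintext.toList = [] then []
  else
    stringToBlock_altSplit (stringToBlock_altPack plaintext.toList)
      (PySem.Int.floordiv (PySem.Str.len plaintext + 16 - 1) 16).toNat

-- ===== PRECONDITION & SPEC =====
def Spec_stringToBlock (plaintext : String) (out : List Int) : Prop := out = stringToBlock_alt plaintext
instance (plaintext : String) (out : List Int) : Decidable (Spec_stringToBlock plaintext out) := by unfold Spec_stringToBlock; infer_instance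

-- ===== CLAIM (what is proved, stated in full; the proofs are below) =====
def Claim_equal_stringToBlock : Prop := ∀ (plaintext : String), Dom_stringToBlock plaintext → Spec_stringToBlock plaintext (stringToBlock plaintext)

-- ===== LEMMAS AND PROOFS =====

lemma len_pySYMBOL : PySem.Chars.len pySYMBOL = 100 := by decide

-- every character admitted by the domain occurs in SYMBOL
set_option maxRecDepth 8192 in
lemma dom_mem_pySYMBOL (c : Char) (h : pvDomChar c = true) : c ∈ pySYMBOL := by
  have hofNat : Char.ofNat c.toNat = c := Char.ofNat_toNat c
  have hlt : c.toNat < 127 := by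
    simp [pvDomChar] at h
    omega
  have hall : ∀ n ∈ List.range 127, pvDomChar (Char.ofNat n) = true → Char.ofNat n ∈ pySYMBOL := by
    decide
  have := hall c.toNat (List.mem_range.mpr hlt) (by rwa [hofNat])
  rwa [hofNat] at this

lemma digit_bounds (c : Char) (h : pvDomChar c = true) :
    0 ≤ PySem.Chars.find pySYMBOL [c] ∧ PySem.Chars.find pySYMBOL [c] < 100 := by
  have hmem : c ∈ pySYMBOL := dom_mem_pySYMBOL c h
  have hinf : [c] <:+: pySYMBOL := by
    obtain ⟨l₁, l₂, hsplit⟩ := List.append_of_mem hmem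
    exact ⟨l₁, l₂, by simp [hsplit]⟩
  have h0 : 0 ≤ PySem.Chars.find pySYMBOL [c] :=
    (PySem.Chars.find_nonneg_iff pySYMBOL [c]).mpr hinf
  refine ⟨h0, ?_⟩
  have hle : PySem.Chars.find pySYMBOL [c] ≤ pySYMBOL.length :=
    PySem.Chars.find_le_length pySYMBOL [c]
  have hlen : pySYMBOL.length = 100 := by decide
  rcases lt_or_eq_of_le hle with hlt | heq
  · omega
  · exfalso
    have hspec := (PySem.Chars.find_spec (s := pySYMBOL) (sub := [c]) h0).1
    rw [heq, hlen] at hspec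
    have hnil : pySYMBOL.drop (((100 : Nat) : Int)).toNat = [] := by decide
    rw [hnil] at hspec
    exact absurd (List.prefix_nil.mp hspec) (by simp)

-- the plain little-endian Horner value both sides are compared through
def pvVal : List Char → Int
  | [] => 0
  | c :: rest => PySem.Chars.find pySYMBOL [c] + 100 * pvVal rest

lemma val_append (xs ys : List Char) :
    pvVal (xs ++ ys) = pvVal xs + (100 : Int) ^ xs.length * pvVal ys := by
  induction xs with
  | nil => simp [pvVal]
  | cons c rest ih =>
      rw [List.cons_append, pvVal, pvVal, ih]
      rw [List.length_cons, pow_succ]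
      ring

lemma val_bounds (cs : List Char) (h : cs.all pvDomChar = true) :
    0 ≤ pvVal cs ∧ pvVal cs < (100 : Int) ^ cs.length := by
  induction cs with
  | nil => simp [pvVal]
  | cons c rest ih =>
      simp only [List.all_cons, Bool.and_eq_true] at h
      obtain ⟨hd0, hd1⟩ := digit_bounds c h.1
      obtain ⟨hp0, hp1⟩ := ih h.2
      rw [pvVal, List.length_cons, pow_succ]
      constructor
      · positivity
      · nlinarith

-- B's divide-and-conquer _pack computes exactly pvVal
lemma pack_eq_val : ∀ (n : Nat) (cs : List Char), cs.length = n →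
    stringToBlock_altPack cs = pvVal cs := by
  intro n
  induction n using Nat.strong_induction_on with
  | _ n ih =>
    intro cs hlen
    rw [stringToBlock_altPack]
    by_cases h1 : cs.length ≤ 1
    · rw [dif_pos h1]
      match cs, h1 with
      | [], _ => simp [pvVal]
      | [c], _ => simp [pvVal]
    · rw [dif_neg h1]
      have hh : 1 ≤ cs.length / 2 ∧ cs.length / 2 < cs.length := by omega
      rw [PySem.List.slice_toNat cs (by norm_num) (by positivity),
        show PySem.List.slice cs (some ((cs.length / 2 : Nat) : Int)) none
          = cs.drop ((cs.length / 2 : Nat) : Int).toNat from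
          PySem.List.slice_from cs (by positivity)]
      have hclean : ((cs.length / 2 : Nat) : Int).toNat - ((0 : Int)).toNat = cs.length / 2 := by
        omega
      simp only [Int.toNat_natCast, Int.toNat_zero, Nat.sub_zero, List.drop_zero]
      rw [ih (cs.take (cs.length / 2)).length (by simp; omega) _ rfl,
        ih (cs.drop (cs.length / 2)).length (by simp; omega) _ rfl]
      have hva := val_append (cs.take (cs.length / 2)) (cs.drop (cs.length / 2))
      rw [List.take_append_drop] at hva
      have h16 : (cs.take (cs.length / 2)).length = cs.length / 2 := by simp; omega
      rw [hva, h16, len_pySYMBOL]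

-- the list of A's block values, chunk by chunk
def pvChunks (cs : List Char) : List Int :=
  if hne : cs = [] then [] else pvVal (cs.take 16) :: pvChunks (cs.drop 16)
termination_by cs.length
decreasing_by
  have hp : 0 < cs.length := List.length_pos_iff.mpr hne
  simp
  omega

lemma chunks_nil : pvChunks [] = [] := by unfold pvChunks; simp

lemma chunks_cons (cs : List Char) (h : cs ≠ []) :
    pvChunks cs = pvVal (cs.take 16) :: pvChunks (cs.drop 16) := by
  conv_lhs => unfold pvChunks
  rw [dif_neg h]

-- A's inner loop in terms of pvVal
lemma forBlock_eq (bs : List Char) :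
    ∀ (i : Nat) (acc : Int),
      stringToBlock_forBlock bs i acc = acc + (PySem.Chars.len pySYMBOL) ^ i * pvVal bs := by
  induction bs with
  | nil => intro i acc; simp [stringToBlock_forBlock, pvVal]
  | cons c rest ih =>
      intro i acc
      rw [stringToBlock_forBlock, ih, pvVal, pow_succ, len_pySYMBOL]
      ring

lemma while_nil : stringToBlock_while [] = [] := by
  unfold stringToBlock_while
  simp

lemma while_long (cs : List Char) (hnil : cs ≠ []) (h : 16 ≤ cs.length) :
    stringToBlock_while cs =
      stringToBlock_forBlock (cs.take 16) 0 0 :: stringToBlock_while (cs.drop 16) := by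
  conv_lhs => rw [stringToBlock_while]
  rw [dif_neg hnil, if_pos h]
  rw [show PySem.List.slice cs (some (16 : Int)) none = cs.drop (16 : Int).toNat from
    PySem.List.slice_from cs (by norm_num)]
  rw [PySem.List.slice_toNat cs (show (0 : Int) ≤ 0 by norm_num) (show (0 : Int) ≤ 16 by norm_num)]
  simp

lemma while_short (cs : List Char) (hnil : cs ≠ []) (h : ¬ 16 ≤ cs.length) :
    stringToBlock_while cs = [stringToBlock_forBlock cs 0 0] := by
  conv_lhs => rw [stringToBlock_while]
  rw [dif_neg hnil, if_neg h]

-- A's while loop produces exactly the chunk values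
lemma while_eq_chunks : ∀ (n : Nat) (cs : List Char), cs.length = n →
    stringToBlock_while cs = pvChunks cs := by
  intro n
  induction n using Nat.strong_induction_on with
  | _ n ih =>
    intro cs hlen
    by_cases hnil : cs = []
    · subst hnil; rw [while_nil, chunks_nil]
    · rw [chunks_cons cs hnil]
      by_cases hlong : 16 ≤ cs.length
      · rw [while_long cs hnil hlong, forBlock_eq,
          ih (cs.drop 16).length (by simp; omega) _ rfl]
        norm_num
      · have hdrop : cs.drop 16 = [] := List.drop_eq_nil_of_le (by omega)
        rw [while_short cs hnil hlong, forBlock_eq, hdrop, chunks_nil,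
          List.take_of_length_le (by omega)]
        norm_num

-- the packed value of a list of blocks, base modulus = 100^16
def pvBVal : List Int → Int
  | [] => 0
  | b :: rest => b + (100 : Int) ^ 16 * pvBVal rest

lemma bval_append (xs ys : List Int) :
    pvBVal (xs ++ ys) = pvBVal xs + ((100 : Int) ^ 16) ^ xs.length * pvBVal ys := by
  induction xs with
  | nil => simp [pvBVal]
  | cons b rest ih =>
      rw [List.cons_append, pvBVal, pvBVal, ih, List.length_cons, pow_succ]
      ring

def pvBlockOK (b : Int) : Prop := 0 ≤ b ∧ b < (100 : Int) ^ 16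

lemma bval_bounds (bs : List Int) (h : ∀ b ∈ bs, pvBlockOK b) :
    0 ≤ pvBVal bs ∧ pvBVal bs < ((100 : Int) ^ 16) ^ bs.length := by
  induction bs with
  | nil => simp [pvBVal]
  | cons b rest ih =>
      obtain ⟨hb0, hb1⟩ := h b (by simp)
      obtain ⟨hr0, hr1⟩ := ih (fun x hx => h x (by simp [hx]))
      rw [pvBVal, List.length_cons, pow_succ]
      have h2 : pvBVal rest + 1 ≤ ((100 : Int) ^ 16) ^ rest.length := Int.add_one_le_iff.mpr hr1
      constructor
      · positivity
      · calc b + (100 : Int) ^ 16 * pvBVal rest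
            < (100 : Int) ^ 16 * (pvBVal rest + 1) := by linarith
          _ ≤ (100 : Int) ^ 16 * ((100 : Int) ^ 16) ^ rest.length :=
              mul_le_mul_of_nonneg_left h2 (by positivity)
          _ = ((100 : Int) ^ 16) ^ rest.length * (100 : Int) ^ 16 := by ring

lemma modulus_pow (h : Nat) : stringToBlock_altModulus ^ h = ((100 : Int) ^ 16) ^ h := by
  rw [stringToBlock_altModulus, len_pySYMBOL]

lemma mod_recover (a b : Int) (h : Nat) (ha0 : 0 ≤ a) (ha1 : a < ((100:Int) ^ 16) ^ h) :
    PySem.Int.mod (a + ((100:Int) ^ 16) ^ h * b) (stringToBlock_altModulus ^ h) = a := by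
  have hM : (0:Int) < ((100:Int) ^ 16) ^ h := by positivity
  rw [modulus_pow, PySem.Int.mod_eq_emod_of_pos hM, Int.add_mul_emod_self_left]
  exact Int.emod_eq_of_lt ha0 ha1

lemma floordiv_recover (a b : Int) (h : Nat) (ha0 : 0 ≤ a) (ha1 : a < ((100:Int) ^ 16) ^ h) :
    PySem.Int.floordiv (a + ((100:Int) ^ 16) ^ h * b) (stringToBlock_altModulus ^ h) = b := by
  have hM : (0:Int) < ((100:Int) ^ 16) ^ h := by positivity
  rw [modulus_pow, PySem.Int.floordiv_eq_iff_of_pos hM]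
  constructor <;> nlinarith

-- B's divide-and-conquer _split inverts pvBVal on bounded block lists
lemma split_eq : ∀ (n : Nat) (bs : List Int), bs.length = n → (∀ b ∈ bs, pvBlockOK b) →
    stringToBlock_altSplit (pvBVal bs) bs.length = bs := by
  intro n
  induction n using Nat.strong_induction_on with
  | _ n ih =>
    intro bs hlen hok
    match bs, hlen with
    | [], _ => simp [stringToBlock_altSplit, pvBVal]
    | [b], _ => simp [stringToBlock_altSplit, pvBVal]
    | (b₁ :: b₂ :: rest), hlen =>
      have hn : rest.length + 2 = n := by simpa using hlen
      have hk : (b₁ :: b₂ :: rest).length = rest.length + 2 := by simp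
      rw [hk]
      rw [stringToBlock_altSplit]
      have hh : 1 ≤ (rest.length + 2) / 2 ∧ (rest.length + 2) / 2 ≤ rest.length + 1 := by omega
      set h := (rest.length + 2) / 2 with hdef
      have hsplit : (b₁ :: b₂ :: rest) = (b₁ :: b₂ :: rest).take h ++ (b₁ :: b₂ :: rest).drop h :=
        (List.take_append_drop h _).symm
      have htlen : ((b₁ :: b₂ :: rest).take h).length = h := by simp; omega
      have htok : ∀ b ∈ (b₁ :: b₂ :: rest).take h, pvBlockOK b :=
        fun b hb => hok b (List.mem_of_mem_take hb)
      have hdok : ∀ b ∈ (b₁ :: b₂ :: rest).drop h, pvBlockOK b :=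
        fun b hb => hok b (List.mem_of_mem_drop hb)
      obtain ⟨ht0, ht1⟩ := bval_bounds _ htok
      rw [htlen] at ht1
      have hbv : pvBVal (b₁ :: b₂ :: rest) =
          pvBVal ((b₁ :: b₂ :: rest).take h) + ((100:Int) ^ 16) ^ h * pvBVal ((b₁ :: b₂ :: rest).drop h) := by
        conv_lhs => rw [hsplit]
        rw [bval_append, htlen]
      rw [hbv, mod_recover _ _ _ ht0 ht1, floordiv_recover _ _ _ ht0 ht1]
      have hrec1 : stringToBlock_altSplit (pvBVal ((b₁ :: b₂ :: rest).take h)) h =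
          (b₁ :: b₂ :: rest).take h := by
        have := ih ((b₁ :: b₂ :: rest).take h).length (by rw [htlen]; omega) _ rfl htok
        rwa [htlen] at this
      have hrec2 : stringToBlock_altSplit (pvBVal ((b₁ :: b₂ :: rest).drop h)) (rest.length + 2 - h) =
          (b₁ :: b₂ :: rest).drop h := by
        have hdl : ((b₁ :: b₂ :: rest).drop h).length = rest.length + 2 - h := by simp
        have := ih ((b₁ :: b₂ :: rest).drop h).length (by rw [hdl]; omega) _ rfl hdok
        rwa [hdl] at this
      rw [hrec1, hrec2]
      conv_rhs => rw [hsplit]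

-- the chunk values are bounded, their packed value is pvVal, and their count is ⌈len/16⌉
lemma chunks_ok : ∀ (n : Nat) (cs : List Char), cs.length = n → cs.all pvDomChar = true →
    (∀ b ∈ pvChunks cs, pvBlockOK b) ∧ pvBVal (pvChunks cs) = pvVal cs ∧
      (pvChunks cs).length = (cs.length + 15) / 16 := by
  intro n
  induction n using Nat.strong_induction_on with
  | _ n ih =>
    intro cs hlen hdom
    by_cases hnil : cs = []
    · subst hnil; simp [chunks_nil, pvBVal, pvVal]
    · have hpos : 0 < cs.length := List.length_pos_iff.mpr hnil
      have htdom : (cs.take 16).all pvDomChar = true :=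
        List.all_eq_true.mpr (fun a ha => List.all_eq_true.mp hdom a (List.mem_of_mem_take ha))
      have hddom : (cs.drop 16).all pvDomChar = true :=
        List.all_eq_true.mpr (fun a ha => List.all_eq_true.mp hdom a (List.mem_of_mem_drop ha))
      obtain ⟨iok, ival, icnt⟩ := ih (cs.drop 16).length (by simp; omega) _ rfl hddom
      obtain ⟨ht0, ht1⟩ := val_bounds (cs.take 16) htdom
      have htb : pvBlockOK (pvVal (cs.take 16)) := by
        refine ⟨ht0, lt_of_lt_of_le ht1 ?_⟩
        apply pow_le_pow_right₀ (by norm_num)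
        simp
      rw [chunks_cons cs hnil]
      refine ⟨?_, ?_, ?_⟩
      · intro b hb
        rcases List.mem_cons.mp hb with hb | hb
        · exact hb ▸ htb
        · exact iok b hb
      · rw [pvBVal, ival]
        have hva := val_append (cs.take 16) (cs.drop 16)
        rw [List.take_append_drop] at hva
        by_cases hlong : 16 ≤ cs.length
        · have h16 : (cs.take 16).length = 16 := by simp; omega
          rw [hva, h16]
        · rw [List.take_of_length_le (by omega), List.drop_eq_nil_of_le (by omega)]
          simp [pvVal]
      · rw [List.length_cons, icnt, List.length_drop]
        omega

lemma alt_count (s : String) :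
    (PySem.Int.floordiv (PySem.Str.len s + 16 - 1) 16).toNat = (s.toList.length + 15) / 16 := by
  have h : PySem.Str.len s = (s.toList.length : Int) := by simp [PySem.Str.len_eq]
  rw [h, PySem.Int.floordiv_eq_ediv_of_pos (by norm_num : (0:Int) < 16)]
  omega

-- ===== VERDICT (by name: the statement is the Claim_ definition above) =====
theorem stringToBlock_spec : Claim_equal_stringToBlock := by
  intro plaintext hdom
  unfold Spec_stringToBlock stringToBlock stringToBlock_alt
  by_cases hnil : plaintext.toList = []
  · rw [if_pos hnil, hnil, while_nil]
  · rw [if_neg hnil, alt_count, pack_eq_val plaintext.toList.length _ rfl]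
    obtain ⟨hok, hval, hcnt⟩ := chunks_ok plaintext.toList.length _ rfl hdom
    rw [← hval, ← hcnt, split_eq (pvChunks plaintext.toList).length _ rfl hok,
      while_eq_chunks plaintext.toList.length _ rfl]
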